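-- pv_equiv track=rewrite | github.com/Abriel14/TIPE_Homologie_Persistante | homology3D.py | paires_pers
-- ===== SOURCE A (Python) =====
-- def low(mat, j):
--     """calcule low(j), low(j) est le plus grand indice i tel que la i-ème valaur de la colonne j de mat vaut 1 """
--     res = -1
--     for i in range(len(mat)):
--         if mat[i][j] == 1:
--             res = i
--     return (res)
--
-- def paires_pers(D, cplx, nbrL):
--     listlow = [low(D, j) for j in range(len(D))]
--     res = []
--     for i in range(len(listlow)):
--         if listlow[i] != -1:
--             (splx, time_d, type) = cplx[i - nbrL]
--             (splx, time_b, typeb) = cplx[listlow[i] - nbrL]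
--             res.append(((time_b, time_d), type))
--     return (res)
-- ===== SOURCE B (Python) =====
-- def paires_pers(D, cplx, nbrL):
--     n = len(D)
--     # scan rows from the bottom up; a column's low is the FIRST row (from below)
--     # holding a 1, so record it once in a dict and drop the column from the
--     # worklist; stop as soon as every column is settled.
--     lows = {}
--     pending = list(range(n))
--     for i in range(n - 1, -1, -1):
--         if not pending:
--             break
--         still = []
--         for j in pending:
--             if D[i][j] == 1:
--                 lows[j] = i
--             else:
--                 still.append(j)
--         pending = still
--     res = []
--     for j in range(n):
--         if j in lows:
--             res.append(((cplx[lows[j] - nbrL][1], cplx[j - nbrL][1]), cplx[j - nbrL][2]))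
--     return res
-- ===== Notes on version B (the rewrite author's own statement) =====
-- stated objective: alternative
-- what changed: Instead of n independent full-column scans keeping the last 1 seen, B sweeps the rows bottom-up with a shrinking worklist of unsettled columns, records each column's low in a dict at its FIRST hit from below, and stops early once every column is settled; the pair list is then emitted by dict lookup.
import Mathlib
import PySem

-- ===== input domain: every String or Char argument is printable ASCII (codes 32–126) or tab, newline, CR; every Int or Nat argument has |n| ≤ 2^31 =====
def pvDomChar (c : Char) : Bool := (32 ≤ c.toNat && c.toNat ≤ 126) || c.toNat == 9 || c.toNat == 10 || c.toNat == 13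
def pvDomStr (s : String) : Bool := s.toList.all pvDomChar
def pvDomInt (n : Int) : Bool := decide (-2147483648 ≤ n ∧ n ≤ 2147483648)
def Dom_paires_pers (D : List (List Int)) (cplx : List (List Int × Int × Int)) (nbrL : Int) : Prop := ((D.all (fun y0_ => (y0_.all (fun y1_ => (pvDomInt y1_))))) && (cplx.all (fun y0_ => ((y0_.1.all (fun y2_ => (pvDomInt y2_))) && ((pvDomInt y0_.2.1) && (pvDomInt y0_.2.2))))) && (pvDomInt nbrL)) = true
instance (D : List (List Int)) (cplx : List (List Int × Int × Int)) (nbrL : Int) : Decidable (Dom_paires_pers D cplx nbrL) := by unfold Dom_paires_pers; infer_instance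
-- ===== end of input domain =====

-- B replaces A's n independent full-column scans (last 1 seen wins) by a bottom-up sweep over
-- the rows with a shrinking worklist of unsettled columns: each column's low is recorded in a
-- dict at its FIRST hit from below and the sweep stops once every column is settled
-- (objective: alternative algorithm, same worst-case cost).

-- ===== PORT A =====
-- shared atomic read 'mat[i][j]' for Nat indices (0 outside a row — Pre_ keeps reads in range)
def pvEntry (D : List (List Int)) (i j : Nat) : Int :=
  (PySem.List.pyGet? (D.getD i []) (j : Int)).getD 0

-- helper 'low(mat, j)': scan all rows, remember the last row index holding a 1 in column j
def pvLow (mat : List (List Int)) (j : Nat) : Int :=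
  (List.range mat.length).foldl
    (fun res i => if pvEntry mat i j = 1 then (i : Int) else res) (-1)

def paires_pers (D : List (List Int)) (cplx : List (List Int × Int × Int)) (nbrL : Int) : List ((Int × Int) × Int) :=
  let listlow := (List.range D.length).map (fun j => pvLow D j)
  (List.range listlow.length).foldl
    (fun res i =>
      if listlow.getD i 0 ≠ -1 then
        let c1 := (PySem.List.pyGet? cplx ((i : Int) - nbrL)).getD ([], 0, 0)
        let c2 := (PySem.List.pyGet? cplx (listlow.getD i 0 - nbrL)).getD ([], 0, 0)
        res ++ [((c2.2.1, c1.2.1), c1.2.2)]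
      else res) []

-- ===== PORT B =====
-- the read 'D[i][j]' with Int indices, as B's inner loop performs it
def pvEntryI (D : List (List Int)) (i j : Int) : Int :=
  (PySem.List.pyGet? ((PySem.List.pyGet? D i).getD []) j).getD 0

-- one row of the sweep: 'for j in pending: if D[i][j]==1: lows[j]=i else still.append(j)'
def pvScanRow (D : List (List Int)) (i : Int)
    (st : PySem.Dict Int Int × List Int) : PySem.Dict Int Int × List Int :=
  st.2.foldl
    (fun st' j =>
      if pvEntryI D i j = 1 then (st'.1.insert j i, st'.2) else (st'.1, st'.2 ++ [j]))
    (st.1, ([] : List Int))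

def paires_pers_alt (D : List (List Int)) (cplx : List (List Int × Int × Int)) (nbrL : Int) : List ((Int × Int) × Int) :=
  let n := D.length
  let fin := (PySem.List.pyRange ((n : Int) - 1) (-1) (-1)).foldl
    (fun st i => if st.2 = [] then st else pvScanRow D i st)
    (PySem.Dict.empty, PySem.List.pyRange 0 (n : Int) 1)
  (PySem.List.pyRange 0 (n : Int) 1).foldl
    (fun res j =>
      if fin.1.contains j then
        res ++ [((((PySem.List.pyGet? cplx (fin.1.getD j 0 - nbrL)).getD ([], 0, 0)).2.1,
                  ((PySem.List.pyGet? cplx (j - nbrL)).getD ([], 0, 0)).2.1),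
                 ((PySem.List.pyGet? cplx (j - nbrL)).getD ([], 0, 0)).2.2)]
      else res) []

-- ===== PRECONDITION & SPEC =====
-- index k is a valid Python index into a list of length len
def pvIdxOK (len : Nat) (k : Int) : Bool := decide (-(len : Int) ≤ k ∧ k < (len : Int))

-- Pre_ = exactly the inputs on which Python A returns without raising: every row is long
-- enough for the n column scans, and for every column j that contains a 1 both cplx indices
-- the loop uses — j - nbrL and (last 1-row of column j) - nbrL — are valid Python indices.
def Pre_paires_pers (D : List (List Int)) (cplx : List (List Int × Int × Int)) (nbrL : Int) : Prop :=
  (D.all (fun r => decide (D.length ≤ r.length)) &&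
   (List.range D.length).all (fun j =>
     !((List.range D.length).any (fun i => pvEntry D i j == 1)) ||
     (pvIdxOK cplx.length ((j : Int) - nbrL) &&
      (List.range D.length).all (fun i =>
        !(pvEntry D i j == 1) ||
        !((List.range D.length).all (fun i' => !(decide (i < i')) || !(pvEntry D i' j == 1))) ||
        pvIdxOK cplx.length ((i : Int) - nbrL))))) = true
instance (D : List (List Int)) (cplx : List (List Int × Int × Int)) (nbrL : Int) : Decidable (Pre_paires_pers D cplx nbrL) := by unfold Pre_paires_pers; infer_instance

def pvWitness_paires_pers : List (List Int) × (List (List Int × Int × Int)) × Int :=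
  ([[0, 1], [0, 0]], [([], 1, 2), ([], 3, 4)], 0)

def Spec_paires_pers (D : List (List Int)) (cplx : List (List Int × Int × Int)) (nbrL : Int) (out : List ((Int × Int) × Int)) : Prop := out = paires_pers_alt D cplx nbrL
instance (D : List (List Int)) (cplx : List (List Int × Int × Int)) (nbrL : Int) (out : List ((Int × Int) × Int)) : Decidable (Spec_paires_pers D cplx nbrL out) := by unfold Spec_paires_pers; infer_instance

-- ===== CLAIM (what is proved, stated in full; the proofs are below) =====
def Claim_equal_paires_pers : Prop := ∀ (D : List (List Int)) (cplx : List (List Int × Int × Int)) (nbrL : Int), Dom_paires_pers D cplx nbrL → Pre_paires_pers D cplx nbrL → Spec_paires_pers D cplx nbrL (paires_pers D cplx nbrL)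

-- ===== LEMMAS AND PROOFS =====

theorem pv_witness_ok :
    Dom_paires_pers (pvWitness_paires_pers.1) (pvWitness_paires_pers.2.1) (pvWitness_paires_pers.2.2) ∧
    Pre_paires_pers (pvWitness_paires_pers.1) (pvWitness_paires_pers.2.1) (pvWitness_paires_pers.2.2) := by
  decide

-- Int-indexed read at Nat casts is the Nat-indexed read
theorem pv_entryI_natCast (D : List (List Int)) (i j : Nat) :
    pvEntryI D (i : Int) (j : Int) = pvEntry D i j := by
  unfold pvEntryI pvEntry
  rw [PySem.List.pyGet?_natCast D i, PySem.List.pyGet?_natCast, PySem.List.pyGet?_natCast]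
  rw [List.getD_eq_getElem?_getD]

-- pvTopHit D j m k = greatest row index i ∈ [m, m+k) with D[i][j] = 1, as an Int; -1 if none
def pvTopHit (D : List (List Int)) (j m : Nat) : Nat → Int
  | 0 => -1
  | k + 1 => if pvEntry D (m + k) j = 1 then ((m + k : Nat) : Int) else pvTopHit D j m k

theorem pv_topHit_bottom (D : List (List Int)) (j m k : Nat) :
    pvTopHit D j m (k + 1) =
      if pvTopHit D j (m + 1) k ≠ -1 then pvTopHit D j (m + 1) k
      else if pvEntry D m j = 1 then (m : Int) else -1 := by
  induction k with
  | zero => simp [pvTopHit]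
  | succ k ih =>
      show (if pvEntry D (m + (k+1)) j = 1 then ((m + (k+1) : Nat) : Int) else pvTopHit D j m (k+1)) = _
      have hr : pvTopHit D j (m + 1) (k + 1)
          = if pvEntry D (m + 1 + k) j = 1 then ((m + 1 + k : Nat) : Int) else pvTopHit D j (m + 1) k := rfl
      have hmk : m + (k + 1) = m + 1 + k := by omega
      by_cases h : pvEntry D (m + 1 + k) j = 1
      · rw [hmk]
        simp only [h, if_true, hr]
        rw [if_pos (by omega : ((m + 1 + k : Nat) : Int) ≠ -1)]
      · rw [hmk]
        simp only [h, if_false, hr, ih]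

theorem pv_topHit_ne_neg_one (D : List (List Int)) (j m k : Nat) (h : pvTopHit D j m k ≠ -1) :
    0 ≤ pvTopHit D j m k := by
  induction k with
  | zero => simp [pvTopHit] at h
  | succ k ih =>
      unfold pvTopHit at h ⊢
      split_ifs with hc
      · positivity
      · simp only [hc, if_false] at h; exact ih h

-- A's forward last-write scan computes pvTopHit from 0
theorem pv_lowAux_eq_topHit (D : List (List Int)) (j m : Nat) :
    (List.range m).foldl (fun res i => if pvEntry D i j = 1 then (i : Int) else res) (-1)
      = pvTopHit D j 0 m := by
  induction m with
  | zero => simp [pvTopHit]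
  | succ m ih =>
      rw [List.range_succ, List.foldl_append]
      simp only [List.foldl_cons, List.foldl_nil, ih]
      show _ = if pvEntry D (0 + m) j = 1 then ((0 + m : Nat) : Int) else pvTopHit D j 0 m
      simp only [Nat.zero_add]

theorem pv_low_eq_topHit (D : List (List Int)) (j : Nat) :
    pvLow D j = pvTopHit D j 0 D.length := pv_lowAux_eq_topHit D j D.length

-- abbreviations used only by the proofs
def pvH (D : List (List Int)) (m j : Nat) : Int := pvTopHit D j m (D.length - m)

def pvPend (D : List (List Int)) (m : Nat) : List Int :=
  ((List.range D.length).filter (fun j => pvH D m j == -1)).map (fun j : Nat => (j : Int))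

-- the inner worklist fold: resulting dict lookups and surviving worklist
theorem pv_scan_get? (D : List (List Int)) (i : Int) (P : List Int)
    (lows : PySem.Dict Int Int) (acc : List Int) (q : Int) :
    (P.foldl (fun st' j => if pvEntryI D i j = 1 then (st'.1.insert j i, st'.2) else (st'.1, st'.2 ++ [j])) (lows, acc)).1.get? q
      = if q ∈ P ∧ pvEntryI D i q = 1 then some i else lows.get? q := by
  induction P generalizing lows acc with
  | nil => simp
  | cons j P ih =>
      simp only [List.foldl_cons]
      by_cases hj : pvEntryI D i j = 1
      · simp only [hj, if_true, ih, PySem.Dict.get?_insert]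
        by_cases hq : q = j
        · subst hq
          by_cases hm : q ∈ P ∧ pvEntryI D i q = 1 <;> simp [hm, hj, List.mem_cons]
        · simp [List.mem_cons, hq]
      · simp only [hj, if_false, ih]
        by_cases hq : q = j
        · subst hq; simp [List.mem_cons, hj]
        · simp [List.mem_cons, hq]

theorem pv_scan_snd (D : List (List Int)) (i : Int) (P : List Int)
    (lows : PySem.Dict Int Int) (acc : List Int) :
    (P.foldl (fun st' j => if pvEntryI D i j = 1 then (st'.1.insert j i, st'.2) else (st'.1, st'.2 ++ [j])) (lows, acc)).2
      = acc ++ P.filter (fun j => !decide (pvEntryI D i j = 1)) := by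
  induction P generalizing lows acc with
  | nil => simp
  | cons j P ih =>
      simp only [List.foldl_cons, List.filter_cons]
      by_cases hj : pvEntryI D i j = 1
      · simp [hj, ih]
      · simp [hj, ih]

-- the guard 'if not pending: break' never changes the state the sweep computes
theorem pv_guard_eq (D : List (List Int)) (i : Int) (st : PySem.Dict Int Int × List Int) :
    (if st.2 = [] then st else pvScanRow D i st) = pvScanRow D i st := by
  split_ifs with h
  · unfold pvScanRow
    rw [h]
    simp only [List.foldl_nil]
    exact (Prod.mk.eta).symm.trans (by rw [h])
  · rfl

theorem pv_mem_pend (D : List (List Int)) (m j : Nat) (hj : j < D.length) :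
    ((j : Int) ∈ pvPend D m) ↔ pvH D m j = -1 := by
  unfold pvPend
  constructor
  · rintro hmem
    rcases List.mem_map.mp hmem with ⟨a, ha, hc⟩
    rcases List.mem_filter.mp ha with ⟨-, h2⟩
    have : a = j := by exact_mod_cast hc
    subst this
    simpa using h2
  · intro h
    exact List.mem_map.mpr ⟨j, List.mem_filter.mpr ⟨List.mem_range.mpr hj, by simpa using h⟩, rfl⟩

-- peel the bottom row out of pvH, for m < n
theorem pv_H_bottom (D : List (List Int)) (m j : Nat) (hm : m < D.length) :
    pvH D m j = if pvH D (m + 1) j ≠ -1 then pvH D (m + 1) j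
                else if pvEntry D m j = 1 then (m : Int) else -1 := by
  unfold pvH
  have hk : D.length - m = (D.length - (m + 1)) + 1 := by omega
  rw [hk, pv_topHit_bottom]

-- one row of the sweep: the worklist shrinks to the still-unsettled columns ...
theorem pv_step_snd (D : List (List Int)) (m : Nat) (lows : PySem.Dict Int Int) (hm : m < D.length) :
    (pvScanRow D (m : Int) (lows, pvPend D (m + 1))).2 = pvPend D m := by
  unfold pvScanRow
  rw [pv_scan_snd]
  simp only [List.nil_append]
  unfold pvPend
  rw [List.filter_map, List.filter_filter]
  congr 1
  apply List.filter_congr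
  intro j hj
  simp only [Function.comp]
  rw [pv_entryI_natCast, pv_H_bottom D m j hm]
  by_cases h1 : pvH D (m + 1) j = -1
  · by_cases h2 : pvEntry D m j = 1
    · have hc : ¬ ((m : Nat) : Int) = -1 := by omega
      simp [h1, h2, hc]
    · simp [h1, h2]
  · have h0 : 0 ≤ pvH D (m + 1) j := by
      unfold pvH at h1 ⊢
      exact pv_topHit_ne_neg_one D j (m + 1) (D.length - (m + 1)) h1
    have hc : ¬ pvH D (m + 1) j = -1 := h1
    simp [h1, show (pvH D (m + 1) j == -1) = false by simp [hc]]

-- ... and the dict acquires exactly the columns whose low is row m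
theorem pv_step_get? (D : List (List Int)) (m : Nat) (lows : PySem.Dict Int Int) (hm : m < D.length)
    (hl : ∀ j : Nat, j < D.length → lows.get? (j : Int) = if pvH D (m + 1) j = -1 then none else some (pvH D (m + 1) j))
    (j : Nat) (hj : j < D.length) :
    (pvScanRow D (m : Int) (lows, pvPend D (m + 1))).1.get? (j : Int)
      = if pvH D m j = -1 then none else some (pvH D m j) := by
  unfold pvScanRow
  rw [pv_scan_get?]
  simp only []
  rw [pv_entryI_natCast, pv_H_bottom D m j hm]
  by_cases h1 : pvH D (m + 1) j = -1
  · by_cases h2 : pvEntry D m j = 1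
    · have hv : (if pvH D (m + 1) j ≠ -1 then pvH D (m + 1) j
          else if pvEntry D m j = 1 then (m : Int) else -1) = (m : Int) := by simp [h1, h2]
      rw [hv, if_pos ⟨(pv_mem_pend D (m + 1) j hj).mpr h1, h2⟩,
          if_neg (by omega : ¬ ((m : Nat) : Int) = -1)]
    · have hv : (if pvH D (m + 1) j ≠ -1 then pvH D (m + 1) j
          else if pvEntry D m j = 1 then (m : Int) else -1) = -1 := by simp [h1, h2]
      rw [hv, if_neg (fun hc => h2 hc.2), hl j hj, if_pos h1, if_pos rfl]
  · have h0 : 0 ≤ pvH D (m + 1) j := by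
      unfold pvH at h1 ⊢
      exact pv_topHit_ne_neg_one D j (m + 1) (D.length - (m + 1)) h1
    have hv : (if pvH D (m + 1) j ≠ -1 then pvH D (m + 1) j
        else if pvEntry D m j = 1 then (m : Int) else -1) = pvH D (m + 1) j := by simp [h1]
    rw [hv, if_neg (fun hc => h1 ((pv_mem_pend D (m + 1) j hj).mp hc.1)), hl j hj,
        if_neg h1]

-- the bottom-up sweep establishes the full-column lows
theorem pv_loop_inv (D : List (List Int)) :
    ∀ m : Nat, m ≤ D.length → ∀ lows : PySem.Dict Int Int,
    (∀ j : Nat, j < D.length → lows.get? (j : Int) = if pvH D m j = -1 then none else some (pvH D m j)) →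
    (∀ j : Nat, j < D.length →
      ((PySem.List.pyRange ((m : Int) - 1) (-1) (-1)).foldl (fun st i => pvScanRow D i st) (lows, pvPend D m)).1.get? (j : Int)
        = if pvH D 0 j = -1 then none else some (pvH D 0 j)) := by
  intro m
  induction m with
  | zero =>
      intro _ lows hl j hj
      rw [PySem.List.pyRange_neg_one_eq_nil (by norm_num)]
      simpa [pvH, Nat.sub_zero] using hl j hj
  | succ m ih =>
      intro hm lows hl j hj
      have hmn : m < D.length := by omega
      rw [show ((m + 1 : Nat) : Int) - 1 = (m : Int) by push_cast; ring]
      rw [PySem.List.pyRange_neg_one_cons (by omega : (-1 : Int) < (m : Nat))]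
      rw [List.foldl_cons]
      have hsnd := pv_step_snd D m lows hmn
      have hpair : pvScanRow D (m : Int) (lows, pvPend D (m + 1))
          = ((pvScanRow D (m : Int) (lows, pvPend D (m + 1))).1, pvPend D m) := by
        rw [← hsnd]
      rw [hpair]
      exact ih (by omega) _ (pv_step_get? D m lows hmn hl) j hj

-- ===== VERDICT (by name: the statement is the Claim_ definition above) =====
theorem paires_pers_spec : Claim_equal_paires_pers := by
  intro D cplx nbrL _ _
  unfold Spec_paires_pers
  have hall : ∀ j : Nat, pvH D D.length j = -1 := fun j => by
    unfold pvH; rw [Nat.sub_self]; rfl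
  have hpend : PySem.List.pyRange 0 (D.length : Int) 1 = pvPend D D.length := by
    unfold pvPend
    rw [List.filter_eq_self.mpr (fun a _ => by simp [hall a]), PySem.List.pyRange_zero_nat]
  have hfin := pv_loop_inv D D.length le_rfl PySem.Dict.empty
    (fun j hj => by rw [PySem.Dict.get?_empty, if_pos (hall j)])
  have hlow : ∀ i : Nat, pvLow D i = pvH D 0 i := fun i => by
    unfold pvH; rw [Nat.sub_zero]; exact pv_low_eq_topHit D i
  unfold paires_pers paires_pers_alt
  simp only [pv_guard_eq, hpend, List.length_map, List.length_range]
  rw [show pvPend D D.length = List.map (fun (k : Nat) => (k : Int)) (List.range D.length) from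
        by rw [← hpend]; exact PySem.List.pyRange_zero_nat D.length] at hfin ⊢
  rw [List.foldl_map]
  apply PySem.List.foldl_congr_mem
  intro acc i hi
  have hi' : i < D.length := List.mem_range.mp hi
  have hget := hfin i hi'
  have hgetd : ((List.range D.length).map (fun j => pvLow D j)).getD i 0 = pvLow D i := by
    rw [List.getD_eq_getElem?_getD, List.getElem?_map, List.getElem?_range hi']
    rfl
  rw [hgetd, PySem.Dict.contains_eq_isSome_get?, hget, PySem.Dict.getD_eq_get?_getD, hget, hlow i]
  by_cases h : pvH D 0 i = -1
  · simp [h]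
  · simp [h]
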